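-- pv_equiv track=rewrite | github.com/alexwaaaaaaa/arambhGPT | arambhgpt-backend/app/health_guidance.py | _determine_wellness_focus
-- ===== SOURCE A (Python) =====
-- from typing import Dict, List, Tuple
--
-- def _determine_wellness_focus(categories: List[str]) -> List[str]:
--     """Determine wellness focus areas"""
--     focus_areas = []
--
--     if any(cat in ['sexual_dysfunction', 'reproductive_health'] for cat in categories):
--         focus_areas.extend(['sexual_wellness', 'reproductive_care'])
--
--     if any(cat in ['hormonal_issues'] for cat in categories):
--         focus_areas.append('hormonal_balance')
--
--     if any(cat in ['mental_health_physical'] for cat in categories):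
--         focus_areas.append('mind_body_connection')
--
--     if any(cat in ['infections_stds'] for cat in categories):
--         focus_areas.extend(['infection_prevention', 'safe_practices'])
--
--     return focus_areas if focus_areas else ['general_wellness']
-- ===== SOURCE B (Python) =====
-- _CAT_BITS = {
--     'sexual_dysfunction': 1,
--     'reproductive_health': 1,
--     'hormonal_issues': 2,
--     'mental_health_physical': 4,
--     'infections_stds': 8,
-- }
--
-- _OUTPUTS = [
--     ['sexual_wellness', 'reproductive_care'],
--     ['hormonal_balance'],
--     ['mind_body_connection'],
--     ['infection_prevention', 'safe_practices'],
-- ]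
--
-- def _determine_wellness_focus(categories):
--     """Determine wellness focus areas"""
--     mask = 0
--     for cat in categories:
--         mask |= _CAT_BITS.get(cat, 0)
--     focus_areas = [area for i, outs in enumerate(_OUTPUTS)
--                    if (mask >> i) & 1
--                    for area in outs]
--     return focus_areas or ['general_wellness']
-- ===== Notes on version B (the rewrite author's own statement) =====
-- stated objective: alternative
-- what changed: Inverts the traversal: instead of four rule branches each scanning the category list, B makes one pass over the categories OR-ing per-category bit flags from a dict into a bitmask, then emits the focus lists whose bit is set.
import Mathlib
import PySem

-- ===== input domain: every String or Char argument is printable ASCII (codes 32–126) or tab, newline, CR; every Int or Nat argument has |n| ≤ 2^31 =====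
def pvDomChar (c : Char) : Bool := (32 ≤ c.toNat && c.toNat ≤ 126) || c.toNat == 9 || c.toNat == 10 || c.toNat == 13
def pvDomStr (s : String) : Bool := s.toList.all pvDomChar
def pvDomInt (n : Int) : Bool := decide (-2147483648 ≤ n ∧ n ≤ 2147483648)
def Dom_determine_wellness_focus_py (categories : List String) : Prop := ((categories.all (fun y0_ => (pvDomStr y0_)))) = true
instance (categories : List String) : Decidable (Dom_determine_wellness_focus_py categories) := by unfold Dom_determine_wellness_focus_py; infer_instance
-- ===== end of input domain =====

-- B inverts the traversal: one pass over the categories OR-ing per-category bit flags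
-- (looked up in a dict) into a bitmask, then emits the focus lists whose bit is set
-- (objective: alternative; return value only).

-- ===== PORT A =====
-- literal transliteration of the four if-blocks of _determine_wellness_focus
def determine_wellness_focus_py (categories : List String) : List String :=
  let focus0 : List String := []
  let f1 := if categories.any (fun cat =>
              cat == "sexual_dysfunction" || cat == "reproductive_health")
            then focus0 ++ ["sexual_wellness", "reproductive_care"] else focus0
  let f2 := if categories.any (fun cat => cat == "hormonal_issues")
            then f1 ++ ["hormonal_balance"] else f1
  let f3 := if categories.any (fun cat => cat == "mental_health_physical")
            then f2 ++ ["mind_body_connection"] else f2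
  let f4 := if categories.any (fun cat => cat == "infections_stds")
            then f3 ++ ["infection_prevention", "safe_practices"] else f3
  if f4 ≠ [] then f4 else ["general_wellness"]

-- ===== PORT B =====
-- _CAT_BITS of Source B (all flag values are nonnegative, so Nat bit-ops are Python-exact here)
def pvCatBits : PySem.Dict String Nat :=
  PySem.Dict.mk
    [("sexual_dysfunction", 1), ("reproductive_health", 1), ("hormonal_issues", 2),
     ("mental_health_physical", 4), ("infections_stds", 8)]

-- _OUTPUTS of Source B
def pvOutputs : List (List String) :=
  [["sexual_wellness", "reproductive_care"], ["hormonal_balance"],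
   ["mind_body_connection"], ["infection_prevention", "safe_practices"]]

def determine_wellness_focus_py_alt (categories : List String) : List String :=
  -- mask = 0; for cat in categories: mask |= _CAT_BITS.get(cat, 0)
  let mask : Nat := categories.foldl (fun m cat => m ||| pvCatBits.getD cat 0) 0
  -- [area for i, outs in enumerate(_OUTPUTS) if (mask >> i) & 1 for area in outs]
  -- (the enumerate index is always ≥ 0, so .toNat is exact)
  let focus_areas := (PySem.List.enumerate pvOutputs).foldl
    (fun acc p => if (mask >>> p.1.toNat) &&& 1 == 1 then acc ++ p.2 else acc) []
  if focus_areas ≠ [] then focus_areas else ["general_wellness"]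

-- ===== PRECONDITION & SPEC =====
def Spec_determine_wellness_focus_py (categories : List String) (out : List String) : Prop := out = determine_wellness_focus_py_alt categories
instance (categories : List String) (out : List String) : Decidable (Spec_determine_wellness_focus_py categories out) := by unfold Spec_determine_wellness_focus_py; infer_instance

-- ===== CLAIM (what is proved, stated in full; the proofs are below) =====
def Claim_equal_determine_wellness_focus_py : Prop := ∀ (categories : List String), Dom_determine_wellness_focus_py categories → Spec_determine_wellness_focus_py categories (determine_wellness_focus_py categories)

-- ===== LEMMAS AND PROOFS =====

-- Python's (x >> i) & 1 == 1 is exactly Nat.testBit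
lemma shift_and_one (x i : Nat) : ((x >>> i) &&& 1 == 1) = x.testBit i := by
  simp [Nat.testBit, Nat.and_comm]

-- bit i of the OR-accumulating fold = bit i of the seed OR some category sets it
lemma foldl_or_testBit (i : Nat) (l : List String) (m : Nat) :
    (l.foldl (fun m cat => m ||| pvCatBits.getD cat 0) m).testBit i
      = (m.testBit i || l.any (fun c => (pvCatBits.getD c 0).testBit i)) := by
  induction l generalizing m with
  | nil => simp
  | cons x xs ih =>
      simp [List.foldl_cons, List.any_cons, ih, Nat.testBit_or, Bool.or_assoc]

-- the per-category bits decoded: each bit corresponds to A's membership test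
lemma bits_testBit_zero (c : String) :
    (pvCatBits.getD c 0).testBit 0
      = (c == "sexual_dysfunction" || c == "reproductive_health") := by
  by_cases h1 : c = "sexual_dysfunction"
  · subst h1; decide
  by_cases h2 : c = "reproductive_health"
  · subst h2; decide
  by_cases h3 : c = "hormonal_issues"
  · subst h3; decide
  by_cases h4 : c = "mental_health_physical"
  · subst h4; decide
  by_cases h5 : c = "infections_stds"
  · subst h5; decide
  simp [pvCatBits, PySem.Dict.getD, PySem.Dict.get?,
        h1, h2, Ne.symm h1, Ne.symm h2, Ne.symm h3, Ne.symm h4, Ne.symm h5]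

lemma bits_testBit_one (c : String) :
    (pvCatBits.getD c 0).testBit 1 = (c == "hormonal_issues") := by
  by_cases h1 : c = "sexual_dysfunction"
  · subst h1; decide
  by_cases h2 : c = "reproductive_health"
  · subst h2; decide
  by_cases h3 : c = "hormonal_issues"
  · subst h3; decide
  by_cases h4 : c = "mental_health_physical"
  · subst h4; decide
  by_cases h5 : c = "infections_stds"
  · subst h5; decide
  simp [pvCatBits, PySem.Dict.getD, PySem.Dict.get?,
        h3, Ne.symm h1, Ne.symm h2, Ne.symm h3, Ne.symm h4, Ne.symm h5]

lemma bits_testBit_two (c : String) :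
    (pvCatBits.getD c 0).testBit 2 = (c == "mental_health_physical") := by
  by_cases h1 : c = "sexual_dysfunction"
  · subst h1; decide
  by_cases h2 : c = "reproductive_health"
  · subst h2; decide
  by_cases h3 : c = "hormonal_issues"
  · subst h3; decide
  by_cases h4 : c = "mental_health_physical"
  · subst h4; decide
  by_cases h5 : c = "infections_stds"
  · subst h5; decide
  simp [pvCatBits, PySem.Dict.getD, PySem.Dict.get?,
        h4, Ne.symm h1, Ne.symm h2, Ne.symm h3, Ne.symm h4, Ne.symm h5]

lemma bits_testBit_three (c : String) :
    (pvCatBits.getD c 0).testBit 3 = (c == "infections_stds") := by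
  by_cases h1 : c = "sexual_dysfunction"
  · subst h1; decide
  by_cases h2 : c = "reproductive_health"
  · subst h2; decide
  by_cases h3 : c = "hormonal_issues"
  · subst h3; decide
  by_cases h4 : c = "mental_health_physical"
  · subst h4; decide
  by_cases h5 : c = "infections_stds"
  · subst h5; decide
  simp [pvCatBits, PySem.Dict.getD, PySem.Dict.get?,
        h5, Ne.symm h1, Ne.symm h2, Ne.symm h3, Ne.symm h4, Ne.symm h5]

-- ===== VERDICT (by name: the statement is the Claim_ definition above) =====
theorem determine_wellness_focus_py_spec : Claim_equal_determine_wellness_focus_py := by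
  intro categories _
  unfold Spec_determine_wellness_focus_py determine_wellness_focus_py determine_wellness_focus_py_alt pvOutputs
  simp only [PySem.List.enumerate_cons, PySem.List.enumerate_nil,
    List.foldl_cons, List.foldl_nil, Int.reduceAdd, Int.reduceToNat,
    shift_and_one, foldl_or_testBit, Nat.zero_testBit, Bool.false_or,
    bits_testBit_zero, bits_testBit_one, bits_testBit_two, bits_testBit_three]
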